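-- pv_equiv track=rewrite | github.com/focworkshop/wbc-praise-stat-2025.github.io | worship_journey.py | consolidate_multiline_rows
-- ===== SOURCE A (Python) =====
-- from typing import List, Dict, Set, Tuple, Optional
--
-- def consolidate_multiline_rows(rows: List[List[str]]) -> List[List[str]]:
--     """
--     Merge rows where the date column is empty (continuation of previous row).
--     """
--     consolidated = []
--     current_row = None
--
--     for row in rows:
--         # Ensure row has enough columns
--         while len(row) < 17:
--             row.append('')
--
--         if row[0] and row[0].strip():  # Has date - new record
--             if current_row:
--                 consolidated.append(current_row)
--             current_row = row.copy()
--         else:  # Continuation of previous row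
--             if current_row:
--                 # Merge non-empty cells
--                 for i in range(1, len(row)):
--                     if row[i] and row[i].strip():
--                         if current_row[i]:
--                             current_row[i] += ' ' + row[i].strip()
--                         else:
--                             current_row[i] = row[i].strip()
--
--     if current_row:
--         consolidated.append(current_row)
--
--     return consolidated
-- ===== SOURCE B (Python) =====
-- from typing import List
--
-- def consolidate_multiline_rows(rows: List[List[str]]) -> List[List[str]]:
--     """
--     Merge rows where the date column is empty (continuation of previous row).
--     Two-phase rewrite: first pad every row in place to 17 columns (same in-place
--     mutation as the original), then skip leading continuation rows and fold each
--     dated row together with its trailing continuation rows into one record.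
--     """
--     for row in rows:
--         row.extend([''] * (17 - len(row)))
--     n = len(rows)
--     idx = 0
--     # drop continuation rows that precede the first dated row
--     while idx < n and not rows[idx][0].strip():
--         idx += 1
--     out = []
--     while idx < n:
--         rec = rows[idx].copy()
--         idx += 1
--         while idx < n and not rows[idx][0].strip():
--             cont = rows[idx]
--             for i, v in enumerate(cont):
--                 if i > 0:
--                     v = v.strip()
--                     if v:
--                         rec[i] = rec[i] + ' ' + v if rec[i] else v
--             idx += 1
--         out.append(rec)
--     return out
-- ===== Notes on version B (the rewrite author's own statement) =====
-- stated objective: alternative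
-- what changed: A's single flush-on-new-date loop with a current_row/consolidated state machine is replaced by a two-phase pass: pad all rows, skip leading continuation rows, then split the list into runs headed by a dated row and fold each run's continuations into a copy of its head; Pre_ excludes exactly the inputs on which A (and B alike) raises IndexError, namely a continuation row longer than both 17 and its governing dated row with a non-blank cell at such an index.
import Mathlib
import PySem

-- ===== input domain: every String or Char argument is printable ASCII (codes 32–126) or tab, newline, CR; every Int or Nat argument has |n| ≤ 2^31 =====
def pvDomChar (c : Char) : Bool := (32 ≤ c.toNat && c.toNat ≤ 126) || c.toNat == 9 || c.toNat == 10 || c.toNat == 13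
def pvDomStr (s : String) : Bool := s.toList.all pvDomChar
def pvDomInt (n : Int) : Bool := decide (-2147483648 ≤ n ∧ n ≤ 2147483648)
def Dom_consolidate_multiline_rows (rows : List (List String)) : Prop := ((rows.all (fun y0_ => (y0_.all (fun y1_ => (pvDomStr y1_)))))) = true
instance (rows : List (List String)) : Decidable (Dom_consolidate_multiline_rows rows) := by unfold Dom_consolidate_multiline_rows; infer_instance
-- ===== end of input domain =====

-- B re-implements A as a two-phase pad-then-group-then-fold pass instead of A's single flush-on-new-date
-- loop (objective: alternative decomposition, same cost). Both Pythons pad the input rows in place; the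
-- equivalence proved here is about the RETURN value only.

-- ===== PORT A =====
-- while len(row) < 17: row.append('')
def pvPadA (r : List String) : List String :=
  if r.length < 17 then pvPadA (r ++ [""]) else r
  termination_by 17 - r.length
  decreasing_by simp; omega

-- row[0] and row[0].strip()  (row already padded, so row[0] exists; truthiness of a str = nonempty)
def pvDatedA (r : List String) : Bool :=
  match PySem.List.pyGet? r 0 with
  | some s => decide (s ≠ "") && decide (PySem.Str.strip s ≠ "")
  | none => false

-- body of 'for i in range(1, len(row))' merging cell i of a continuation row into current_row
def pvMergeCellA (row : List String) (c : List String) (i : Int) : List String :=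
  match PySem.List.pyGet? row i with
  | none => c
  | some v =>
    if v ≠ "" ∧ PySem.Str.strip v ≠ "" then
      match PySem.List.pyGet? c i with
      | none => c  -- Python raises IndexError here; excluded by Pre_
      | some cv =>
        if cv ≠ "" then PySem.List.pySetD c i (cv ++ " " ++ PySem.Str.strip v)
        else PySem.List.pySetD c i (PySem.Str.strip v)
    else c

def pvMergeRowA (c row : List String) : List String :=
  (PySem.List.pyRange 1 (row.length : Int) 1).foldl (pvMergeCellA row) c

-- one iteration of A's main loop; state = (consolidated, current_row).
-- current_row is None or a padded (hence nonempty) row, so 'if current_row:' = isSome.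
def pvStepA (s : List (List String) × Option (List String)) (row : List String) :
    List (List String) × Option (List String) :=
  let row := pvPadA row
  if pvDatedA row then
    match s.2 with
    | some c => (s.1 ++ [c], some row)
    | none   => (s.1, some row)
  else
    match s.2 with
    | some c => (s.1, some (pvMergeRowA c row))
    | none   => s

def consolidate_multiline_rows (rows : List (List String)) : List (List String) :=
  let s := rows.foldl pvStepA ([], none)
  match s.2 with
  | some c => s.1 ++ [c]
  | none => s.1

-- ===== PORT B =====
-- row.extend([''] * (17 - len(row)))
def pvPadB (r : List String) : List String := r ++ List.replicate (17 - r.length) ""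

-- not rows[idx][0].strip()  (applied to padded rows only, which are nonempty)
def pvContB (r : List String) : Bool :=
  match r with
  | [] => true
  | a :: _ => PySem.Str.strip a == ""

-- for i, v in enumerate(cont): if i > 0: v = v.strip(); if v: rec[i] = rec[i]+' '+v if rec[i] else v
def pvMergeRowB (rec cont : List String) : List String :=
  (PySem.List.enumerate cont).foldl (fun rc p =>
    if (0:Int) < p.1 then
      let v := PySem.Str.strip p.2
      if v ≠ "" then
        match PySem.List.pyGet? rc p.1 with
        | none => rc  -- Python raises IndexError here; excluded by Pre_
        | some cv =>
          if cv ≠ "" then PySem.List.pySetD rc p.1 (cv ++ " " ++ v)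
          else PySem.List.pySetD rc p.1 v
      else rc
    else rc) rec

-- outer 'while idx < n' loop: each round consumes one dated row and its continuation run
def pvConsB (rs : List (List String)) : List (List String) :=
  match rs with
  | [] => []
  | r :: rest =>
      ((rest.takeWhile pvContB).foldl pvMergeRowB r) :: pvConsB (rest.dropWhile pvContB)
  termination_by rs.length
  decreasing_by simp; have := List.length_dropWhile_le pvContB rest; omega

def consolidate_multiline_rows_alt (rows : List (List String)) : List (List String) :=
  pvConsB ((rows.map pvPadB).dropWhile pvContB)

-- ===== PRECONDITION & SPEC =====
-- Pre_ excludes exactly the inputs on which A raises IndexError: a continuation row that is longer than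
-- both 17 and its governing dated row, with a non-blank cell at such an overhanging index.
-- For every continuation row j whose governing dated row (the nearest dated row k above it) exists,
-- every cell of row j at an index i that is both ≥ 17 and ≥ len(row k) must be blank.
def pvPreCheck (rows : List (List String)) : Bool :=
  (List.range rows.length).all fun k =>
    (List.range rows.length).all fun j =>
      (!(decide (k < j) && !(PySem.Str.strip ((rows.getD k []).getD 0 "") == "")
          && (PySem.Str.strip ((rows.getD j []).getD 0 "") == "")
          && ((List.range rows.length).all fun m =>
               !(decide (k < m) && decide (m < j))
               || (PySem.Str.strip ((rows.getD m []).getD 0 "") == ""))))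
      || ((List.range (rows.getD j []).length).all fun i =>
           !(decide (17 ≤ i) && decide ((rows.getD k []).length ≤ i))
           || (PySem.Str.strip ((rows.getD j []).getD i "") == ""))

def Pre_consolidate_multiline_rows (rows : List (List String)) : Prop :=
  pvPreCheck rows = true
instance (rows : List (List String)) : Decidable (Pre_consolidate_multiline_rows rows) := by
  unfold Pre_consolidate_multiline_rows; infer_instance

def pvWitness_consolidate_multiline_rows : List (List String) :=
  [["2025-01-05", "song a"], ["", "song b"], ["2025-01-12", "song c"]]

def Spec_consolidate_multiline_rows (rows : List (List String)) (out : List (List String)) : Prop := out = consolidate_multiline_rows_alt rows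
instance (rows : List (List String)) (out : List (List String)) : Decidable (Spec_consolidate_multiline_rows rows out) := by unfold Spec_consolidate_multiline_rows; infer_instance

-- ===== CLAIM (what is proved, stated in full; the proofs are below) =====
def Claim_equal_consolidate_multiline_rows : Prop := ∀ (rows : List (List String)), Dom_consolidate_multiline_rows rows → Pre_consolidate_multiline_rows rows → Spec_consolidate_multiline_rows rows (consolidate_multiline_rows rows)

-- ===== LEMMAS AND PROOFS =====

lemma pvPad_eq (r : List String) : pvPadA r = pvPadB r := by
  induction r using pvPadA.induct with
  | case1 r h ih =>
    rw [pvPadA, if_pos h, ih]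
    simp only [pvPadB, List.length_append, List.length_cons, List.length_nil, List.append_assoc]
    have h17 : 17 - r.length = (17 - (r.length + 0 + 1)) + 1 := by omega
    rw [h17, List.replicate_succ]
    rfl
  | case2 r h =>
    rw [pvPadA, if_neg h]
    simp only [pvPadB]
    have : 17 - r.length = 0 := by omega
    simp [this]

lemma pvStrip_empty_of_eq (v : String) (h : v = "") : PySem.Str.strip v = "" := by
  subst h; decide

lemma pvDated_eq (r : List String) : pvDatedA (pvPadB r) = !pvContB (pvPadB r) := by
  cases r with
  | nil => decide
  | cons a t =>
    simp only [pvPadB, List.cons_append]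
    unfold pvDatedA pvContB
    rw [PySem.List.pyGet?_zero_cons]
    by_cases h : a = ""
    · subst h; simp [pvStrip_empty_of_eq "" rfl]
    · by_cases hs : PySem.Str.strip a = "" <;> simp [h, hs]

lemma pvMergeRow_eq (c r : List String) : pvMergeRowA c r = pvMergeRowB c r := by
  unfold pvMergeRowA pvMergeRowB
  rw [PySem.List.enumerate_eq_map_pyRange r "", List.foldl_map, PySem.List.len_eq]
  rcases r with _ | ⟨a, t⟩
  · simp [PySem.List.pyRange_one_eq_nil]
  · set r := a :: t with hr
    have hlen : (0:Int) < (r.length : Int) := by simp [hr]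
    have h01 : PySem.List.pyRange 0 (r.length : Int) = 0 :: PySem.List.pyRange 1 (r.length : Int) := by
      have := PySem.List.pyRange_one_cons (a := 0) (b := (r.length : Int)) hlen
      simpa using this
    rw [h01, List.foldl_cons]
    simp only [show ¬((0:Int) < 0) by omega, if_false]
    apply PySem.List.foldl_congr_mem
    intro rc i hi
    rw [PySem.List.mem_pyRange_one] at hi
    have h0 : (0:Int) ≤ i := by omega
    have h1 : i < (r.length : Int) := hi.2
    unfold pvMergeCellA
    rw [PySem.List.pyGet?_eq_some_getElem r h0 h1, PySem.List.pyGetD_eq_getElem r "" h0 h1]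
    have hip : (0:Int) < i := by omega
    simp only [hip, if_true]
    by_cases hsv : PySem.Str.strip (r[i.toNat]'(by omega)) = ""
    · simp [hsv]
    · have hvne : (r[i.toNat]'(by omega)) ≠ "" := fun h => hsv (pvStrip_empty_of_eq _ h)
      simp [hsv, hvne]

def pvFinish (s : List (List String) × Option (List String)) : List (List String) :=
  match s.2 with
  | some c => s.1 ++ [c]
  | none => s.1

def pvTail (cur : Option (List String)) (ps : List (List String)) : List (List String) :=
  match cur with
  | none => pvConsB (ps.dropWhile pvContB)
  | some c => ((ps.takeWhile pvContB).foldl pvMergeRowB c) :: pvConsB (ps.dropWhile pvContB)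

lemma pvMain (rows : List (List String)) :
    ∀ (acc : List (List String)) (cur : Option (List String)),
      pvFinish (rows.foldl pvStepA (acc, cur)) = acc ++ pvTail cur (rows.map pvPadB) := by
  induction rows with
  | nil => intro acc cur; cases cur <;> simp [pvFinish, pvTail, pvConsB]
  | cons r rest ih =>
    intro acc cur
    rw [List.foldl_cons]
    have hstep : pvStepA (acc, cur) r =
        (if pvDatedA (pvPadB r) then
          match cur with
          | some c => (acc ++ [c], some (pvPadB r))
          | none   => (acc, some (pvPadB r))
        else
          match cur with
          | some c => (acc, some (pvMergeRowA c (pvPadB r)))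
          | none   => (acc, cur)) := by
      unfold pvStepA
      rw [pvPad_eq]
    rw [hstep, pvDated_eq]
    by_cases hc : pvContB (pvPadB r) = true
    · -- continuation row
      have hdrop : List.dropWhile pvContB (pvPadB r :: List.map pvPadB rest)
          = List.dropWhile pvContB (List.map pvPadB rest) := by
        simp [hc]
      have htake : List.takeWhile pvContB (pvPadB r :: List.map pvPadB rest)
          = pvPadB r :: List.takeWhile pvContB (List.map pvPadB rest) := by
        simp [hc]
      simp only [hc, Bool.not_true, Bool.false_eq_true, if_false]
      cases cur with
      | none =>
        rw [ih]
        simp only [pvTail, List.map_cons, hdrop]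
      | some c =>
        rw [ih]
        simp only [pvTail, List.map_cons, htake, hdrop, List.foldl_cons]
        rw [pvMergeRow_eq]
    · -- dated row
      have hc' : pvContB (pvPadB r) = false := by simpa using hc
      have hdrop : List.dropWhile pvContB (pvPadB r :: List.map pvPadB rest)
          = pvPadB r :: List.map pvPadB rest := by
        simp [hc']
      have htake : List.takeWhile pvContB (pvPadB r :: List.map pvPadB rest) = [] := by
        simp [hc']
      have hcons : pvConsB (pvPadB r :: List.map pvPadB rest)
          = ((List.takeWhile pvContB (List.map pvPadB rest)).foldl pvMergeRowB (pvPadB r))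
            :: pvConsB (List.dropWhile pvContB (List.map pvPadB rest)) := by
        rw [pvConsB.eq_def]
      simp only [hc', Bool.not_false, if_true]
      cases cur with
      | none =>
        rw [ih]
        simp only [pvTail, List.map_cons, hdrop, hcons]
      | some c =>
        rw [ih]
        simp only [pvTail, List.map_cons, htake, hdrop, hcons, List.foldl_nil]
        simp

-- ===== VERDICT (by name: the statement is the Claim_ definition above) =====
theorem consolidate_multiline_rows_spec : Claim_equal_consolidate_multiline_rows := by
  intro rows _ _
  show consolidate_multiline_rows rows = consolidate_multiline_rows_alt rows
  have h := pvMain rows [] none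
  simpa [pvFinish, pvTail, consolidate_multiline_rows, consolidate_multiline_rows_alt] using h
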